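-- pv_equiv track=rewrite | github.com/pypi-data/pypi-mirror-400 | packages/apr-detector/apr_detector-0.1.0.tar.gz/apr_detector-0.1.0/apr_detector/core/detector.py | _merge_strands
-- ===== SOURCE A (Python) =====
-- def _merge_strands(strands) -> str:
--     """Merge strand strings into '+', '-', or '+-'."""
--     strand_set = set()
--     for st in strands:
--         if not isinstance(st, str):
--             continue
--         strand_set.update(ch for ch in st if ch in {"+", "-"})
--     if "+" in strand_set and "-" in strand_set:
--         return "+-"
--     if "+" in strand_set:
--         return "+"
--     if "-" in strand_set:
--         return "-"
--     return ""
-- ===== SOURCE B (Python) =====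
-- def _merge_strands(strands) -> str:
--     """Merge strand strings into '+', '-', or '+-'."""
--     has_plus = any(isinstance(st, str) and "+" in st for st in strands)
--     has_minus = any(isinstance(st, str) and "-" in st for st in strands)
--     return ("+" if has_plus else "") + ("-" if has_minus else "")
-- ===== Notes on version B (the rewrite author's own statement) =====
-- stated objective: simpler
-- what changed: Replaces the accumulated character set and four-branch return cascade with two any() substring-membership scans and a single concatenation expression.
import Mathlib
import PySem

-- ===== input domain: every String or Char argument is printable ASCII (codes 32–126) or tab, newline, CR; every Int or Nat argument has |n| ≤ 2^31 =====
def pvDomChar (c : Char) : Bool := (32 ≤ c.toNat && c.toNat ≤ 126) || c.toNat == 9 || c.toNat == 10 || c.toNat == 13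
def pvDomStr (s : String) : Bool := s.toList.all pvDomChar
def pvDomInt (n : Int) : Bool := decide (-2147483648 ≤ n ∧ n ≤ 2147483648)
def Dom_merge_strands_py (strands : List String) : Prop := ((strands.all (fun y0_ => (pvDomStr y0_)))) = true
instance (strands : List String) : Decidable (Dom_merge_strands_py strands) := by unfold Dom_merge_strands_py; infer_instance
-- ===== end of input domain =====

-- B replaces A's accumulated character set and four-branch return cascade with two any()
-- scans and one concatenation (simpler; same cost).

-- ===== PORT A =====
-- strand_set built by set.update over the filtered characters of each string
def merge_strands_py (strands : List String) : String :=
  let strand_set : PySem.Set Char :=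
    strands.foldl
      (fun acc st => PySem.Set.update acc (st.toList.filter (fun ch => ch = '+' ∨ ch = '-')))
      PySem.Set.empty
  if '+' ∈ strand_set ∧ '-' ∈ strand_set then "+-"
  else if '+' ∈ strand_set then "+"
  else if '-' ∈ strand_set then "-"
  else ""

-- ===== PORT B =====
def merge_strands_py_alt (strands : List String) : String :=
  let has_plus := strands.any (fun st => st.toList.contains '+')
  let has_minus := strands.any (fun st => st.toList.contains '-')
  String.ofList ((if has_plus then ['+'] else []) ++ (if has_minus then ['-'] else []))

-- ===== PRECONDITION & SPEC =====
def Spec_merge_strands_py (strands : List String) (out : String) : Prop := out = merge_strands_py_alt strands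
instance (strands : List String) (out : String) : Decidable (Spec_merge_strands_py strands out) := by unfold Spec_merge_strands_py; infer_instance

-- ===== CLAIM (what is proved, stated in full; the proofs are below) =====
def Claim_equal_merge_strands_py : Prop := ∀ (strands : List String), Dom_merge_strands_py strands → Spec_merge_strands_py strands (merge_strands_py strands)

-- ===== LEMMAS AND PROOFS =====

-- membership in A's accumulated set = some strand contains the character (for c ∈ {+,-})
theorem mem_foldl_update (c : Char) (hc : c = '+' ∨ c = '-') (strands : List String)
    (s : PySem.Set Char) :
    (c ∈ strands.foldl
      (fun acc st => PySem.Set.update acc (st.toList.filter (fun ch => ch = '+' ∨ ch = '-')))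
      s) ↔ c ∈ s ∨ ∃ st ∈ strands, c ∈ st.toList := by
  induction strands generalizing s with
  | nil => simp
  | cons st rest ih =>
    simp only [List.foldl_cons, ih, PySem.Set.mem_update, List.mem_filter, List.mem_cons,
      decide_eq_true_eq]
    constructor
    · rintro ((h | ⟨h, _⟩) | ⟨t, ht, hm⟩)
      · exact Or.inl h
      · exact Or.inr ⟨st, Or.inl rfl, h⟩
      · exact Or.inr ⟨t, Or.inr ht, hm⟩
    · rintro (h | ⟨t, (rfl | ht), hm⟩)
      · exact Or.inl (Or.inl h)
      · exact Or.inl (Or.inr ⟨hm, hc⟩)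
      · exact Or.inr ⟨t, ht, hm⟩

-- ===== VERDICT (by name: the statement is the Claim_ definition above) =====
theorem merge_strands_py_spec : Claim_equal_merge_strands_py := by
  intro strands _
  unfold Spec_merge_strands_py merge_strands_py merge_strands_py_alt
  simp only [mem_foldl_update '+' (Or.inl rfl) strands PySem.Set.empty,
             mem_foldl_update '-' (Or.inr rfl) strands PySem.Set.empty]
  by_cases hp : ∃ st ∈ strands, '+' ∈ st.toList <;>
  by_cases hm : ∃ st ∈ strands, '-' ∈ st.toList <;>
    simp [hp, hm, PySem.Set.empty, String.ofList] <;> rfl
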